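-- pv_equiv track=rewrite | github.com/dave322942780/AlgoLand | print_brackets.py | solution
-- ===== SOURCE A (Python) =====
-- def solution(lst):
--     def _solution(idx, so_far, sol):
--         if idx == len(lst):
--             sol.append(so_far)
--         else:
--             for i in range(len(lst), idx, -1):
--                 _solution(i, so_far + "(%s)" % "".join(map(lambda x: str(x), lst[idx:i])), sol)
--
--         return sol
--
--     return _solution(0, "", list())
-- ===== SOURCE B (Python) =====
-- def solution(lst):
--     # Bottom-up DP: build the list of bracketed groupings for every suffix once,
--     # from the shortest suffix to the whole list, instead of recomputing them
--     # through top-down recursion with a growing prefix string.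
--     n = len(lst)
--     tbl = [[""]]  # tbl[t] = groupings of the suffix lst[n - len(tbl) + 1 + t:]
--     for idx in range(n - 1, -1, -1):
--         entry = []
--         for i in range(n, idx, -1):
--             seg = "(%s)" % "".join(map(str, lst[idx:i]))
--             entry.extend(seg + s for s in tbl[i - idx - 1])
--         tbl = [entry] + tbl
--     return tbl[0]
-- ===== Notes on version B (the rewrite author's own statement) =====
-- stated objective: alternative
-- what changed: Replaces A's top-down recursion (which carries a growing prefix string and a shared accumulator list, recomputing each suffix's groupings once per prefix) with a bottom-up dynamic-programming table that computes the groupings of every suffix exactly once and assembles the answer from shorter suffixes.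
import Mathlib
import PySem

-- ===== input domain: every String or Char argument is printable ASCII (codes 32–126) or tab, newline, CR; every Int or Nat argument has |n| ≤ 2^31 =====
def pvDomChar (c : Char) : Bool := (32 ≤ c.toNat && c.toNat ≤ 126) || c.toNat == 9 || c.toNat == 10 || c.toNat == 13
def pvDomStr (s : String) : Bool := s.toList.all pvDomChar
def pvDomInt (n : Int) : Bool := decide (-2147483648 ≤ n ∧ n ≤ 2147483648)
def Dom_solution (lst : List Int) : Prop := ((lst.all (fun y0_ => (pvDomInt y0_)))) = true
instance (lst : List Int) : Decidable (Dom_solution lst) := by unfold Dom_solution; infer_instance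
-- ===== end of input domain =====

-- B replaces A's top-down recursion over a growing prefix string with a bottom-up table of suffix solutions (DP); same values, alternative structure.

-- ===== PORT A =====
-- shared formatting helper: "(%s)" % "".join(map(str, lst[idx:i]))  (exact: PySem slice/toStr)
def segStr (lst : List Int) (idx i : Nat) : String :=
  "(" ++ String.join ((PySem.List.slice lst (some (idx : Int)) (some (i : Int))).map PySem.Int.toStr) ++ ")"

-- hand port of range(a, b, -1) over Nat indices: [a, a-1, …, b+1] (exact: empty when a ≤ b, as in Python)
def descRange (a b : Nat) : List Nat := (List.range (a - b)).map (fun j => a - j)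

-- cited by goA's termination proof
theorem mem_descRange {a b i : Nat} (h : i ∈ descRange a b) : b < i ∧ i ≤ a := by
  simp only [descRange, List.mem_map, List.mem_range] at h
  obtain ⟨j, hj, rfl⟩ := h; omega

-- A's inner _solution(idx, so_far, sol): appends to sol; loops over range(len(lst), idx, -1)
def goA (lst : List Int) (idx : Nat) (so_far : String) (sol : List String) : List String :=
  if idx = lst.length then sol ++ [so_far]
  else (descRange lst.length idx).attach.foldl
    (fun sol i => goA lst i.1 (so_far ++ segStr lst idx i.1) sol) sol
termination_by lst.length - idx
decreasing_by
  have := mem_descRange i.2; omega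

def solution (lst : List Int) : List String := goA lst 0 "" []

-- ===== PORT B =====
-- buildB lst d = the table tbl of Source B after the loop has handled idx = n-1 … n-d
-- (tbl[t] = groupings of the suffix starting at n-d+t, shortest suffix last)
def buildB (lst : List Int) : Nat → List (List String)
  | 0 => [[""]]
  | d + 1 =>
    let tbl := buildB lst d
    let idx := lst.length - (d + 1)
    ((descRange lst.length idx).foldl
      (fun entry i => entry ++ (tbl.getD (i - idx - 1) []).map (fun s => segStr lst idx i ++ s)) []) :: tbl

def solution_alt (lst : List Int) : List String := (buildB lst lst.length).getD 0 []

-- ===== PRECONDITION & SPEC =====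
def Spec_solution (lst : List Int) (out : List String) : Prop := out = solution_alt lst
instance (lst : List Int) (out : List String) : Decidable (Spec_solution lst out) := by unfold Spec_solution; infer_instance

-- ===== CLAIM (what is proved, stated in full; the proofs are below) =====
def Claim_equal_solution : Prop := ∀ (lst : List Int), Dom_solution lst → Spec_solution lst (solution lst)

-- ===== LEMMAS AND PROOFS =====

theorem attach_descRange_nil {a b : Nat} (h : a ≤ b) : (descRange a b).attach = [] := by
  rw [List.attach_eq_nil_iff]
  simp [descRange, Nat.sub_eq_zero_of_le h]

-- A's accumulator/prefix discipline: sol is only appended to, so_far only prefixes each result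
theorem goA_shift (lst : List Int) :
    ∀ k idx, lst.length - idx ≤ k → ∀ (so_far : String) (sol : List String),
      goA lst idx so_far sol = sol ++ (goA lst idx "" []).map (fun t => so_far ++ t) := by
  intro k
  induction k with
  | zero =>
    intro idx hk so_far sol
    by_cases h : idx = lst.length
    · rw [goA, goA]; simp [h, String.append_empty]
    · rw [goA, goA, if_neg h, if_neg h, attach_descRange_nil (by omega)]
      simp
  | succ k ih =>
    intro idx hk so_far sol
    by_cases h : idx = lst.length
    · rw [goA, goA]; simp [h, String.append_empty]
    · by_cases hgt : lst.length < idx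
      · rw [goA, goA, if_neg h, if_neg h, attach_descRange_nil (le_of_lt hgt)]
        simp
      · rw [goA, goA, if_neg h, if_neg h]
        have hstep : ∀ (pre : String) (sol₀ : List String),
            List.foldl (fun (sol : List String) (i : {x // x ∈ descRange lst.length idx}) =>
                goA lst i.1 (pre ++ segStr lst idx i.1) sol) sol₀ (descRange lst.length idx).attach
            = List.foldl (fun (sol : List String) (i : {x // x ∈ descRange lst.length idx}) =>
                 sol ++ (goA lst i.1 "" []).map (fun t => (pre ++ segStr lst idx i.1) ++ t)) sol₀
                 (descRange lst.length idx).attach := by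
          intro pre sol₀
          apply PySem.List.foldl_congr_mem
          intro acc i _
          have hm := mem_descRange i.2
          exact ih i.1 (by omega) _ _
        rw [hstep so_far sol, hstep "" [], PySem.List.foldl_append_eq_flatMap,
            PySem.List.foldl_append_eq_flatMap]
        simp [List.map_flatMap, List.map_map, Function.comp_def, String.append_assoc]

-- closed recursion of A's enumeration at so_far = "", sol = []
theorem goA_char (lst : List Int) (idx : Nat) (h : idx ≠ lst.length) :
    goA lst idx "" [] =
      (descRange lst.length idx).flatMap
        (fun i => (goA lst i "" []).map (fun t => segStr lst idx i ++ t)) := by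
  conv_lhs => rw [goA, if_neg h]
  have hstep :
      List.foldl (fun (sol : List String) (i : {x // x ∈ descRange lst.length idx}) =>
          goA lst i.1 ("" ++ segStr lst idx i.1) sol) [] (descRange lst.length idx).attach
      = List.foldl (fun (sol : List String) (i : {x // x ∈ descRange lst.length idx}) =>
          sol ++ (goA lst i.1 "" []).map (fun t => segStr lst idx i.1 ++ t)) []
          (descRange lst.length idx).attach := by
    apply PySem.List.foldl_congr_mem
    intro acc i _
    rw [goA_shift lst (lst.length - i.1) i.1 le_rfl]
    simp [String.empty_append]
  rw [hstep, PySem.List.foldl_append_eq_flatMap]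
  conv_rhs => rw [← List.attach_map_subtype_val (descRange lst.length idx)]
  rw [List.flatMap_map]
  simp

-- B's table invariant: after d steps the table lists A's suffix solutions from index n-d to n
theorem buildB_eq (lst : List Int) :
    ∀ d, d ≤ lst.length →
      buildB lst d = (List.range (d + 1)).map (fun t => goA lst (lst.length - d + t) "" []) := by
  intro d
  induction d with
  | zero =>
    intro _
    rw [buildB, List.range_one]
    simp only [List.map_cons, List.map_nil, Nat.sub_zero, Nat.add_zero]
    rw [goA]
    simp
  | succ d ih =>
    intro hd
    rw [buildB, ih (by omega)]
    have hidx : lst.length - (d + 1) ≠ lst.length := by omega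
    rw [PySem.List.foldl_append_eq_flatMap]
    have hbody :
        (descRange lst.length (lst.length - (d + 1))).flatMap
          (fun i => (((List.range (d + 1)).map (fun t => goA lst (lst.length - d + t) "" [])).getD
              (i - (lst.length - (d + 1)) - 1) []).map
            (fun s => segStr lst (lst.length - (d + 1)) i ++ s))
        = goA lst (lst.length - (d + 1)) "" [] := by
      rw [goA_char lst _ hidx]
      apply List.flatMap_congr
      intro i hi
      have hm := mem_descRange hi
      rw [PySem.List.getD_map_range _ _ _ _ (by omega)]
      have harg : lst.length - d + (i - (lst.length - (d + 1)) - 1) = i := by omega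
      rw [harg]
    rw [hbody]
    conv_rhs => rw [List.range_succ_eq_map, List.map_cons, List.map_map]
    congr 1
    apply List.map_congr_left
    intro t _
    simp only [Function.comp_apply]
    have harg2 : lst.length - (d + 1) + (t + 1) = lst.length - d + t := by omega
    rw [harg2]

-- ===== VERDICT (by name: the statement is the Claim_ definition above) =====
theorem solution_spec : Claim_equal_solution := by
  intro lst _
  unfold Spec_solution solution solution_alt
  rw [buildB_eq lst lst.length le_rfl, PySem.List.getD_map_range _ _ _ _ (by omega)]
  simp
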